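-- pv_equiv track=rewrite | github.com/cambridge-cares/TheWorldAvatar | Agents/MackayCalculatorAgent/utils/plot_formatter.py | parseFlowEdges
-- ===== SOURCE A (Python) =====
-- def parseFlowEdges(edges):
--     nodes = {}
--     idx = 0
--     labels = []
--     sources = []
--     targets = []
--     for s, t in edges:
--         if s not in nodes:
--             nodes[s] = idx
--             idx = idx+1
--             labels.append(s)
--         if t not in nodes:
--             nodes[t] = idx
--             idx = idx+1
--             labels.append(t)
--         sources.append(nodes[s])
--         targets.append(nodes[t])
--     return labels,sources,targets
-- ===== SOURCE B (Python) =====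
-- def parseFlowEdges(edges):
--     edges = list(edges)
--     labels = []
--     for s, t in edges:
--         if s not in labels:
--             labels.append(s)
--         if t not in labels:
--             labels.append(t)
--     sources = [labels.index(s) for s, _ in edges]
--     targets = [labels.index(t) for _, t in edges]
--     return labels, sources, targets
-- ===== Notes on version B (the rewrite author's own statement) =====
-- stated objective: alternative
-- what changed: Drops the auxiliary index dictionary entirely: B builds only the first-appearance label list, and recovers each edge endpoint's index afterwards by positional search (list.index) over that list, instead of maintaining node->index mappings while accumulating sources/targets in one interleaved pass.
import Mathlib
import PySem

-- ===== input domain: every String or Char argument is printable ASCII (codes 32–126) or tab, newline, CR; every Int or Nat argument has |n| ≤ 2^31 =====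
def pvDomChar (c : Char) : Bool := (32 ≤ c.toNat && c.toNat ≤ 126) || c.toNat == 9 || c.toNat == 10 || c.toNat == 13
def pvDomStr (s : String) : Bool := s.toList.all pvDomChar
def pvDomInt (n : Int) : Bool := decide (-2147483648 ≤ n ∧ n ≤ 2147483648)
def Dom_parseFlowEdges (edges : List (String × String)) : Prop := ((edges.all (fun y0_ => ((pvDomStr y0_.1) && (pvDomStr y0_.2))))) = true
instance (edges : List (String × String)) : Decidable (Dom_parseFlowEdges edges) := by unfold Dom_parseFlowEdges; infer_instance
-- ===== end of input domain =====

-- B drops the node->index dictionary: it only builds the first-appearance label list, then recovers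
-- each endpoint's index by positional search (list.index) over that list; same return value.

-- ===== PORT A =====
-- one loop iteration of A: conditionally register s, then t, then append the two lookups
def stepA (st : PySem.Dict String Int × Int × List String × List Int × List Int)
    (e : String × String) : PySem.Dict String Int × Int × List String × List Int × List Int :=
  let (nodes, idx, labels, sources, targets) := st
  let (s, t) := e
  let (nodes, idx, labels) :=
    if nodes.contains s = false then (nodes.insert s idx, idx + 1, labels ++ [s])
    else (nodes, idx, labels)
  let (nodes, idx, labels) :=
    if nodes.contains t = false then (nodes.insert t idx, idx + 1, labels ++ [t])
    else (nodes, idx, labels)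
  (nodes, idx, labels, sources ++ [nodes.getD s 0], targets ++ [nodes.getD t 0])

def parseFlowEdges (edges : List (String × String)) : List String × List Int × List Int :=
  let st := edges.foldl stepA (PySem.Dict.empty, 0, [], [], [])
  (st.2.2.1, st.2.2.2.1, st.2.2.2.2)

-- ===== PORT B =====
-- 'if x not in labels: labels.append(x)'
def addLabel (labels : List String) (x : String) : List String :=
  if labels.contains x = false then labels ++ [x] else labels

-- 'labels.index(x)' (always found in B's use; getD 0 totalises the unreachable ValueError)
def labelIndex (labels : List String) (x : String) : Int :=
  (((PySem.List.index? labels x).getD 0 : Nat) : Int)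

def parseFlowEdges_alt (edges : List (String × String)) : List String × List Int × List Int :=
  let labels := edges.foldl (fun l e => addLabel (addLabel l e.1) e.2) []
  (labels, edges.map (fun e => labelIndex labels e.1), edges.map (fun e => labelIndex labels e.2))

-- ===== PRECONDITION & SPEC =====
def Spec_parseFlowEdges (edges : List (String × String)) (out : List String × List Int × List Int) : Prop := out = parseFlowEdges_alt edges
instance (edges : List (String × String)) (out : List String × List Int × List Int) : Decidable (Spec_parseFlowEdges edges out) := by unfold Spec_parseFlowEdges; infer_instance

-- ===== CLAIM (what is proved, stated in full; the proofs are below) =====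
def Claim_equal_parseFlowEdges : Prop := ∀ (edges : List (String × String)), Dom_parseFlowEdges edges → Spec_parseFlowEdges edges (parseFlowEdges edges)

-- ===== LEMMAS AND PROOFS =====

-- invariant: A's dict is exactly the positional index of B's label list
def DictIdx (nodes : PySem.Dict String Int) (labels : List String) : Prop :=
  ∀ k, nodes.get? k = (PySem.List.index? labels k).map (fun n => (n : Int))

-- B's per-edge step, named for the proofs
def step2 (l : List String) (e : String × String) : List String := addLabel (addLabel l e.1) e.2

theorem contains_eq_of_inv {nodes : PySem.Dict String Int} {labels : List String}
    (h : DictIdx nodes labels) (x : String) : nodes.contains x = labels.contains x := by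
  rw [PySem.Dict.contains_eq_isSome_get?, h x]
  by_cases hx : x ∈ labels
  · obtain ⟨n, hn⟩ := Option.isSome_iff_exists.1 ((PySem.List.index?_isSome_iff labels x).2 hx)
    rw [hn]; simp [hx]
  · rw [(PySem.List.index?_eq_none_iff labels x).2 hx]; simp [hx]

theorem inv_insert {nodes : PySem.Dict String Int} {labels : List String}
    (h : DictIdx nodes labels) {x : String} (hx : x ∉ labels) :
    DictIdx (nodes.insert x (labels.length : Int)) (labels ++ [x]) := by
  intro k
  by_cases hk : k = x
  · subst hk
    rw [PySem.Dict.get?_insert_self, PySem.List.index?_append_singleton_self labels _ hx]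
    rfl
  · rw [PySem.Dict.get?_insert_of_ne _ _ hk, h k]
    by_cases hm : k ∈ labels
    · rw [PySem.List.index?_append_of_mem _ hm]
    · rw [(PySem.List.index?_eq_none_iff labels k).2 hm, (PySem.List.index?_eq_none_iff (labels ++ [x]) k).2 (by
        intro hc
        rcases List.mem_append.1 hc with h1 | h1
        · exact hm h1
        · exact hk (List.mem_singleton.1 h1))]

-- the conditional-register block of A, under the invariant
theorem add_block {nodes : PySem.Dict String Int} {labels : List String}
    (h : DictIdx nodes labels) (x : String) :
    (if nodes.contains x = false
       then (nodes.insert x (labels.length : Int), (labels.length : Int) + 1, labels ++ [x])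
       else (nodes, (labels.length : Int), labels))
      = ((if nodes.contains x = false then nodes.insert x (labels.length : Int) else nodes),
         ((addLabel labels x).length : Int), addLabel labels x)
      ∧ DictIdx (if nodes.contains x = false then nodes.insert x (labels.length : Int) else nodes)
            (addLabel labels x) := by
  rw [contains_eq_of_inv h, addLabel]
  by_cases hm : x ∈ labels
  · simp [hm, h]
  · have hc : labels.contains x = false := by simp [hm]
    simp only [hc]
    refine ⟨by simp, ?_⟩
    simpa using inv_insert h hm

theorem mem_addLabel_self (l : List String) (x : String) : x ∈ addLabel l x := by
  unfold addLabel; split_ifs with hc <;> simp_all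

theorem addLabel_append (l : List String) (x : String) : ∃ suf, addLabel l x = l ++ suf := by
  unfold addLabel; split_ifs
  · exact ⟨[x], rfl⟩
  · exact ⟨[], by simp⟩

theorem foldl_step2_append (l : List (String × String)) (labels : List String) :
    ∃ suf, l.foldl step2 labels = labels ++ suf := by
  induction l generalizing labels with
  | nil => exact ⟨[], by simp⟩
  | cons e rest ih =>
      obtain ⟨s1, h1⟩ := addLabel_append labels e.1
      obtain ⟨s2, h2⟩ := addLabel_append (addLabel labels e.1) e.2
      obtain ⟨s3, h3⟩ := ih (step2 labels e)
      exact ⟨(s1 ++ s2) ++ s3, by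
        rw [List.foldl_cons, h3]; unfold step2; rw [h2, h1]; simp⟩

-- a label already present keeps its index through the rest of B's first pass
theorem labelIndex_foldl_of_mem (l : List (String × String)) (labels : List String)
    {x : String} (hx : x ∈ labels) :
    labelIndex (l.foldl step2 labels) x = labelIndex labels x := by
  obtain ⟨suf, hs⟩ := foldl_step2_append l labels
  rw [hs, labelIndex, labelIndex, PySem.List.index?_append_of_mem _ hx]

-- main invariant: A's fold from a synchronised state = B's label pass + positional lookups
theorem foldA_eq (l : List (String × String)) :
    ∀ (nodes : PySem.Dict String Int) (labels : List String) (src tgt : List Int),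
    DictIdx nodes labels →
    ((l.foldl stepA (nodes, (labels.length : Int), labels, src, tgt)).2.2.1,
     (l.foldl stepA (nodes, (labels.length : Int), labels, src, tgt)).2.2.2.1,
     (l.foldl stepA (nodes, (labels.length : Int), labels, src, tgt)).2.2.2.2) =
      (l.foldl step2 labels,
       src ++ l.map (fun e => labelIndex (l.foldl step2 labels) e.1),
       tgt ++ l.map (fun e => labelIndex (l.foldl step2 labels) e.2)) := by
  induction l with
  | nil => intro nodes labels src tgt _; simp
  | cons e rest ih =>
      intro nodes labels src tgt hinv
      obtain ⟨s, t⟩ := e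
      rw [List.foldl_cons]
      obtain ⟨hb1, hinv1⟩ := add_block hinv s
      set N1 := if nodes.contains s = false then nodes.insert s (labels.length : Int) else nodes with hN1
      set L1 := addLabel labels s with hL1
      obtain ⟨hb2, hinv2⟩ := add_block hinv1 t
      set N2 := if N1.contains t = false then N1.insert t (L1.length : Int) else N1 with hN2
      set L2 := addLabel L1 t with hL2
      have hsmem : s ∈ L2 := by
        obtain ⟨suf, hs⟩ := addLabel_append L1 t
        rw [hL2, hs]; exact List.mem_append.2 (Or.inl (mem_addLabel_self labels s))
      have htmem : t ∈ L2 := mem_addLabel_self L1 t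
      have hlook : ∀ x ∈ L2, N2.getD x 0 = labelIndex L2 x := by
        intro x hx
        rw [PySem.Dict.getD_eq_get?_getD, hinv2 x, labelIndex]
        obtain ⟨n, hn⟩ := Option.isSome_iff_exists.1 ((PySem.List.index?_isSome_iff L2 x).2 hx)
        rw [hn]; simp
      have hstep : stepA (nodes, (labels.length : Int), labels, src, tgt) (s, t)
          = (N2, (L2.length : Int), L2, src ++ [labelIndex L2 s], tgt ++ [labelIndex L2 t]) := by
        show (let (nodes, idx, labels) :=
                if nodes.contains s = false then (nodes.insert s (labels.length : Int), (labels.length : Int) + 1, labels ++ [s])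
                else (nodes, (labels.length : Int), labels)
              let (nodes', idx', labels') :=
                if nodes.contains t = false then (nodes.insert t idx, idx + 1, labels ++ [t])
                else (nodes, idx, labels)
              (nodes', idx', labels', src ++ [nodes'.getD s 0], tgt ++ [nodes'.getD t 0])) = _
        rw [hb1]
        simp only
        rw [hb2]
        simp only
        rw [hlook s hsmem, hlook t htmem]
      rw [hstep]
      have := ih N2 L2 (src ++ [labelIndex L2 s]) (tgt ++ [labelIndex L2 t]) hinv2
      rw [this]
      rw [show List.foldl step2 labels ((s, t) :: rest) = List.foldl step2 L2 rest from rfl]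
      rw [List.map_cons, List.map_cons]
      show _ = (_, src ++ (labelIndex _ s :: _), tgt ++ (labelIndex _ t :: _))
      rw [labelIndex_foldl_of_mem rest L2 hsmem, labelIndex_foldl_of_mem rest L2 htmem]
      simp

-- ===== VERDICT (by name: the statement is the Claim_ definition above) =====
theorem parseFlowEdges_spec : Claim_equal_parseFlowEdges := by
  intro edges _
  show _ = _
  simp only [parseFlowEdges, parseFlowEdges_alt]
  have h := foldA_eq edges PySem.Dict.empty [] [] [] (by
    intro k
    rw [(PySem.List.index?_eq_none_iff ([] : List String) k).2 (by simp)]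
    simp [PySem.Dict.get?_empty])
  simp only [List.length_nil, Int.natCast_zero] at h
  have h2 : edges.foldl step2 [] = edges.foldl (fun l e => addLabel (addLabel l e.1) e.2) [] := rfl
  rw [← h2]
  exact h
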